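-- pv_equiv track=rewrite | github.com/Nikkuniku/AtcoderProgramming | Project Euler/112.py | check_count
-- ===== SOURCE A (Python) =====
-- def check_count(N):
--     res = 0
--     for i in range(10, N + 1):
--         p = str(i)
--         # 増加数かチェック
--         isZouka = True
--         for j in range(1, len(p)):
--             if not int(p[j - 1]) <= int(p[j]):
--                 isZouka = False
--                 break
--         isGensyo = True
--         for j in range(1, len(p)):
--             if not int(p[j - 1]) >= int(p[j]):
--                 isGensyo = False
--                 break
--         if isZouka or isGensyo:
--             continue
--         res += 1
--     return res
-- ===== SOURCE B (Python) =====
-- def bouncy(i):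
--     # scan digits right-to-left, tracking whether an ascent and a descent exist;
--     # stop as soon as both are found
--     up = down = False
--     d = i % 10
--     n = i // 10
--     while n:
--         c = n % 10
--         if c < d:
--             if down:
--                 return True
--             up = True
--         elif c > d:
--             if up:
--                 return True
--             down = True
--         d = c
--         n //= 10
--     return False
--
--
-- def check_count(N):
--     # numbers below 100 are never bouncy (a single adjacent pair cannot both rise and fall)
--     return sum(1 for i in range(100, N + 1) if bouncy(i))
-- ===== Notes on version B (the rewrite author's own statement) =====
-- stated objective: faster
-- what changed: B drops the string conversion entirely: instead of building str(i) and making two int()-parsing passes over it, it scans the digits of i right-to-left with % and // in a single pass, tracks ascent/descent flags with an early exit once both are seen, and skips one- and two-digit numbers, which are never bouncy.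
import Mathlib
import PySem

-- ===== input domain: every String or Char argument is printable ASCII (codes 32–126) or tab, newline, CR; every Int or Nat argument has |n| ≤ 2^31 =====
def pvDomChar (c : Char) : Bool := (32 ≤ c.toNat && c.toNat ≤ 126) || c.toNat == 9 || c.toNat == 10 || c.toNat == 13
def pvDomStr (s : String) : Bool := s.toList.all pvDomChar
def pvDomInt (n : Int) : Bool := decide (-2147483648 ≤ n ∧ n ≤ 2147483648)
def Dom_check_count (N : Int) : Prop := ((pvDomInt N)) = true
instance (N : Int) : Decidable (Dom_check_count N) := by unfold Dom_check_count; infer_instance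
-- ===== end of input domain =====

-- B replaces A's per-number string checks (two int()-parsing passes over str(i)) by a single
-- right-to-left arithmetic digit scan with early exit, starting at 100 (no smaller number is bouncy).

-- ===== PORT A =====
-- int(p[j]): the index is always in range and the character a decimal digit here,
-- so neither Option default below is ever taken.
def pvDigA (p : String) (j : Int) : Int :=
  ((PySem.Str.pyGet? p j).bind (fun c => PySem.Int.ofChars? [c])).getD 0

-- 'for j in range(1, len(p)): if not ... : isZouka = False; break'
def pvZoukaLoop (p : String) : List Int → Bool
  | [] => true
  | j :: js => if ¬ (pvDigA p (j-1) ≤ pvDigA p j) then false else pvZoukaLoop p js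

def pvGensyoLoop (p : String) : List Int → Bool
  | [] => true
  | j :: js => if ¬ (pvDigA p (j-1) ≥ pvDigA p j) then false else pvGensyoLoop p js

def check_count (N : Int) : Int :=
  (PySem.List.pyRange 10 (N+1) 1).foldl
    (fun res i =>
      let p := PySem.Int.toStr i
      let isZouka := pvZoukaLoop p (PySem.List.pyRange 1 (PySem.Str.len p) 1)
      let isGensyo := pvGensyoLoop p (PySem.List.pyRange 1 (PySem.Str.len p) 1)
      if isZouka || isGensyo then res else res + 1) 0

-- ===== PORT B =====
-- 'while n:' — n is nonnegative on every call reached from check_count_alt (i ≥ 100),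
-- so the loop condition is 0 < n; termination is by n.toNat.
def pvBouncyGo (n d : Int) (up down : Bool) : Bool :=
  if _h : 0 < n then
    let c := PySem.Int.mod n 10
    if c < d then
      (if down then true else pvBouncyGo (PySem.Int.floordiv n 10) c true down)
    else if d < c then
      (if up then true else pvBouncyGo (PySem.Int.floordiv n 10) c up true)
    else pvBouncyGo (PySem.Int.floordiv n 10) c up down
  else false
termination_by n.toNat
decreasing_by all_goals
  · rw [PySem.Int.floordiv_eq_ediv_of_pos (by omega : (0:Int) < 10)]; omega

def pvBouncy (i : Int) : Bool :=
  pvBouncyGo (PySem.Int.floordiv i 10) (PySem.Int.mod i 10) false false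

def check_count_alt (N : Int) : Int :=
  ((PySem.List.pyRange 100 (N+1) 1).countP (fun i => pvBouncy i) : Int)

-- ===== PRECONDITION & SPEC =====
def Spec_check_count (N : Int) (out : Int) : Prop := out = check_count_alt N
instance (N : Int) (out : Int) : Decidable (Spec_check_count N out) := by unfold Spec_check_count; infer_instance

-- ===== CLAIM (what is proved, stated in full; the proofs are below) =====
def Claim_equal_check_count : Prop := ∀ (N : Int), Dom_check_count N → Spec_check_count N (check_count N)

-- ===== LEMMAS AND PROOFS =====

-- big-endian decimal digits of n (as Ints), [] for 0
def pvDigs (n : Nat) : List Int :=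
  if n = 0 then [] else pvDigs (n / 10) ++ [((n % 10 : Nat) : Int)]
decreasing_by omega

-- 'some adjacent pair rises' / 'falls'
def pvRise : List Int → Bool
  | a :: b :: t => decide (a < b) || pvRise (b :: t)
  | _ => false

def pvFall : List Int → Bool
  | a :: b :: t => decide (b < a) || pvFall (b :: t)
  | _ => false

theorem pvDigs_bounds (n : Nat) : ∀ d ∈ pvDigs n, 0 ≤ d ∧ d < 10 := by
  induction n using Nat.strong_induction_on with
  | _ n ih =>
    rw [pvDigs]
    split
    · simp
    · rename_i h
      intro d hd
      rcases List.mem_append.mp hd with h1 | h2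
      · exact ih (n / 10) (by omega) d h1
      · simp only [List.mem_singleton] at h2
        subst h2
        constructor
        · positivity
        · exact_mod_cast Nat.mod_lt n (by omega)

theorem toDigitsCore_eq (f : Nat) : ∀ (n : Nat) (ds : List Char), 0 < n → n < 10 ^ f →
    Nat.toDigitsCore 10 f n ds = (pvDigs n).map (fun z => Nat.digitChar z.toNat) ++ ds := by
  induction f with
  | zero => intro n ds h1 h2; omega
  | succ f ih =>
    intro n ds h1 h2
    rw [Nat.toDigitsCore.eq_2]
    by_cases hd : n / 10 = 0
    · rw [if_pos hd]
      conv_rhs => rw [pvDigs, if_neg (by omega : ¬ n = 0), hd, pvDigs]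
      simp
      all_goals congr 1
    · rw [if_neg hd]
      have hlt : n / 10 < 10 ^ f := by
        have hp : 10 ^ (f + 1) = 10 ^ f * 10 := pow_succ 10 f
        omega
      rw [ih (n / 10) _ (by omega) hlt]
      conv_rhs => rw [pvDigs, if_neg (by omega : ¬ n = 0)]
      simp
      all_goals congr 2

theorem toStr_toList (i : Int) (h : 1 ≤ i) :
    (PySem.Int.toStr i).toList = (pvDigs i.toNat).map (fun z => Nat.digitChar z.toNat) := by
  rw [PySem.Int.toList_toStr, PySem.Int.toChars, if_neg (by omega)]
  rw [Nat.toDigits]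
  rw [toDigitsCore_eq (i.toNat + 1) i.toNat [] (by omega)
    (lt_of_lt_of_le (Nat.lt_pow_self (by norm_num)) (Nat.pow_le_pow_right (by norm_num) (by omega)))]
  simp

theorem ofChars_digitChar (d : Int) (h0 : 0 ≤ d) (h9 : d < 10) :
    PySem.Int.ofChars? [Nat.digitChar d.toNat] = some d := by
  interval_cases d <;> decide

theorem pvDigA_eq (i : Int) (h : 1 ≤ i) (j : Int) (h0 : 0 ≤ j)
    (hk : (j : Int) < (pvDigs i.toNat).length) :
    pvDigA (PySem.Int.toStr i) j = (pvDigs i.toNat).getD j.toNat 0 := by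
  have hj : j = ((j.toNat : Nat) : Int) := by omega
  have hklt : j.toNat < (pvDigs i.toNat).length := by omega
  rw [pvDigA, hj, PySem.Str.pyGet?_natCast, toStr_toList i h]
  rw [List.getElem?_map, List.getElem?_eq_getElem hklt]
  have hb := pvDigs_bounds i.toNat _ (List.getElem_mem hklt)
  simp only [Option.map_some, Option.bind_some, Int.toNat_natCast]
  rw [List.getD_eq_getElem _ _ hklt, ofChars_digitChar _ hb.1 hb.2]
  rfl

theorem pvZoukaLoop_all (p : String) (js : List Int) :
    pvZoukaLoop p js = js.all (fun j => decide (pvDigA p (j-1) ≤ pvDigA p j)) := by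
  induction js with
  | nil => rfl
  | cons j js ih =>
    rw [pvZoukaLoop, List.all_cons, ih]
    by_cases hj : pvDigA p (j-1) ≤ pvDigA p j <;> simp [hj]

theorem pvGensyoLoop_all (p : String) (js : List Int) :
    pvGensyoLoop p js = js.all (fun j => decide (pvDigA p (j-1) ≥ pvDigA p j)) := by
  induction js with
  | nil => rfl
  | cons j js ih =>
    rw [pvGensyoLoop, List.all_cons, ih]
    by_cases hj : pvDigA p (j-1) ≥ pvDigA p j <;> simp [hj]

theorem pvFall_eq_false (l : List Int) : pvFall l = false ↔ List.IsChain (· ≤ ·) l := by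
  induction l with
  | nil => simp [pvFall]
  | cons a t ih =>
    cases t with
    | nil => simp [pvFall]
    | cons b t' =>
      rw [pvFall, List.isChain_cons_cons, ← ih]
      simp only [Bool.or_eq_false_iff, decide_eq_false_iff_not]
      constructor
      · rintro ⟨h1, h2⟩; exact ⟨by omega, h2⟩
      · rintro ⟨h1, h2⟩; exact ⟨by omega, h2⟩

theorem pvRise_eq_false (l : List Int) : pvRise l = false ↔ List.IsChain (· ≥ ·) l := by
  induction l with
  | nil => simp [pvRise]
  | cons a t ih =>
    cases t with
    | nil => simp [pvRise]
    | cons b t' =>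
      rw [pvRise, List.isChain_cons_cons, ← ih]
      simp only [Bool.or_eq_false_iff, decide_eq_false_iff_not]
      constructor
      · rintro ⟨h1, h2⟩; exact ⟨by omega, h2⟩
      · rintro ⟨h1, h2⟩; exact ⟨by omega, h2⟩

theorem pvZouka_char (i : Int) (h : 1 ≤ i) :
    pvZoukaLoop (PySem.Int.toStr i)
      (PySem.List.pyRange 1 (PySem.Str.len (PySem.Int.toStr i)) 1) = !pvFall (pvDigs i.toNat) := by
  have hlen : PySem.Str.len (PySem.Int.toStr i) = ((pvDigs i.toNat).length : Int) := by
    rw [PySem.Str.len_eq, toStr_toList i h]; simp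
  rw [pvZoukaLoop_all, hlen]
  rw [Bool.eq_iff_iff, List.all_eq_true, Bool.not_eq_true', pvFall_eq_false,
    List.isChain_iff_getElem]
  constructor
  · intro hall k hk
    have hm : ((k+1 : Nat) : Int) ∈ PySem.List.pyRange 1 ((pvDigs i.toNat).length : Int) 1 := by
      rw [PySem.List.mem_pyRange_one]; constructor <;> omega
    have h2 := hall _ hm
    rw [decide_eq_true_iff,
      pvDigA_eq i h _ (by omega) (by omega), pvDigA_eq i h _ (by omega) (by omega)] at h2
    have e1 : (((k+1 : Nat) : Int) - 1).toNat = k := by omega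
    have e2 : (((k+1 : Nat) : Int)).toNat = k + 1 := by omega
    rw [e1, e2, List.getD_eq_getElem _ _ (by omega), List.getD_eq_getElem _ _ hk] at h2
    exact h2
  · intro hc j hj
    rw [PySem.List.mem_pyRange_one] at hj
    rw [decide_eq_true_iff,
      pvDigA_eq i h _ (by omega) (by omega), pvDigA_eq i h _ (by omega) (by omega),
      List.getD_eq_getElem _ _ (by omega), List.getD_eq_getElem _ _ (by omega)]
    have hk : (j-1).toNat + 1 < (pvDigs i.toNat).length := by omega
    have h2 := hc ((j-1).toNat) hk
    have e : j.toNat = (j-1).toNat + 1 := by omega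
    simp only [e]
    exact h2

theorem pvGensyo_char (i : Int) (h : 1 ≤ i) :
    pvGensyoLoop (PySem.Int.toStr i)
      (PySem.List.pyRange 1 (PySem.Str.len (PySem.Int.toStr i)) 1) = !pvRise (pvDigs i.toNat) := by
  have hlen : PySem.Str.len (PySem.Int.toStr i) = ((pvDigs i.toNat).length : Int) := by
    rw [PySem.Str.len_eq, toStr_toList i h]; simp
  rw [pvGensyoLoop_all, hlen]
  rw [Bool.eq_iff_iff, List.all_eq_true, Bool.not_eq_true', pvRise_eq_false,
    List.isChain_iff_getElem]
  constructor
  · intro hall k hk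
    have hm : ((k+1 : Nat) : Int) ∈ PySem.List.pyRange 1 ((pvDigs i.toNat).length : Int) 1 := by
      rw [PySem.List.mem_pyRange_one]; constructor <;> omega
    have h2 := hall _ hm
    rw [decide_eq_true_iff,
      pvDigA_eq i h _ (by omega) (by omega), pvDigA_eq i h _ (by omega) (by omega)] at h2
    have e1 : (((k+1 : Nat) : Int) - 1).toNat = k := by omega
    have e2 : (((k+1 : Nat) : Int)).toNat = k + 1 := by omega
    rw [e1, e2, List.getD_eq_getElem _ _ (by omega), List.getD_eq_getElem _ _ hk] at h2
    exact h2
  · intro hc j hj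
    rw [PySem.List.mem_pyRange_one] at hj
    rw [decide_eq_true_iff,
      pvDigA_eq i h _ (by omega) (by omega), pvDigA_eq i h _ (by omega) (by omega),
      List.getD_eq_getElem _ _ (by omega), List.getD_eq_getElem _ _ (by omega)]
    have hk : (j-1).toNat + 1 < (pvDigs i.toNat).length := by omega
    have h2 := hc ((j-1).toNat) hk
    have e : j.toNat = (j-1).toNat + 1 := by omega
    simp only [e]
    exact h2

theorem pvRise_append_pair (xs : List Int) (c d : Int) :
    pvRise (xs ++ [c, d]) = (pvRise (xs ++ [c]) || decide (c < d)) := by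
  induction xs with
  | nil => simp [pvRise]
  | cons a t ih =>
    cases t with
    | nil => simp [pvRise]
    | cons b t' =>
      simp only [List.cons_append, pvRise] at *
      rw [ih, Bool.or_assoc]

theorem pvFall_append_pair (xs : List Int) (c d : Int) :
    pvFall (xs ++ [c, d]) = (pvFall (xs ++ [c]) || decide (d < c)) := by
  induction xs with
  | nil => simp [pvFall]
  | cons a t ih =>
    cases t with
    | nil => simp [pvFall]
    | cons b t' =>
      simp only [List.cons_append, pvFall] at *
      rw [ih, Bool.or_assoc]

theorem pvBouncyGo_spec (m : Nat) : ∀ (n d : Int) (up down : Bool), n.toNat = m → 0 ≤ n →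
    ¬ (up = true ∧ down = true) →
    pvBouncyGo n d up down =
      ((up || pvRise (pvDigs n.toNat ++ [d])) && (down || pvFall (pvDigs n.toNat ++ [d]))) := by
  induction m using Nat.strong_induction_on with
  | _ m ih =>
    intro n d up down hm h0 hud
    rw [pvBouncyGo]
    by_cases hn : 0 < n
    · have hc : PySem.Int.mod n 10 = ((n.toNat % 10 : Nat) : Int) := by
        rw [PySem.Int.mod_eq_emod_of_pos (by omega)]; omega
      have hf : PySem.Int.floordiv n 10 = ((n.toNat / 10 : Nat) : Int) := by
        rw [PySem.Int.floordiv_eq_ediv_of_pos (by omega)]; omega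
      have hra : pvDigs n.toNat ++ [d]
          = pvDigs (n.toNat / 10) ++ [((n.toNat % 10 : Nat) : Int), d] := by
        rw [pvDigs, if_neg (by omega), List.append_assoc]; rfl
      rw [hra, pvRise_append_pair, pvFall_append_pair]
      simp only [hc, hf, dif_pos hn]
      have key : ∀ (u2 d2 : Bool), ¬ (u2 = true ∧ d2 = true) →
          pvBouncyGo ((n.toNat / 10 : Nat) : Int) ((n.toNat % 10 : Nat) : Int) u2 d2 =
            ((u2 || pvRise (pvDigs (n.toNat / 10) ++ [((n.toNat % 10 : Nat) : Int)])) &&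
             (d2 || pvFall (pvDigs (n.toNat / 10) ++ [((n.toNat % 10 : Nat) : Int)]))) := by
        intro u2 d2 h2
        have h3 := ih (n.toNat / 10) (by omega) ((n.toNat / 10 : Nat) : Int)
          ((n.toNat % 10 : Nat) : Int) u2 d2 (by omega) (by positivity) h2
        simp only [Int.toNat_natCast] at h3
        exact h3
      have k1 := key true false (by simp)
      have k2 := key false true (by simp)
      rcases lt_trichotomy ((n.toNat % 10 : Nat) : Int) d with h1 | h1 | h1
      · rw [if_pos h1, decide_eq_true h1, decide_eq_false (lt_asymm h1)]
        cases down
        · rw [if_neg (by simp), k1]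
          simp
        · simp
      · rw [if_neg (by omega), if_neg (by omega),
          decide_eq_false (by omega : ¬ ((n.toNat % 10 : Nat) : Int) < d),
          decide_eq_false (by omega : ¬ d < ((n.toNat % 10 : Nat) : Int)), key up down hud]
        simp
      · rw [if_neg (by omega), if_pos h1,
          decide_eq_false (by omega : ¬ ((n.toNat % 10 : Nat) : Int) < d), decide_eq_true h1]
        cases up
        · rw [if_neg (by simp), k2]
          simp
        · simp
    · have hn0 : n = 0 := by omega
      rw [dif_neg hn]
      subst hn0
      rw [show ((0 : Int)).toNat = 0 from rfl, pvDigs]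
      cases up <;> cases down <;> simp_all [pvRise, pvFall]

theorem pvBouncy_eq (i : Int) (h : 1 ≤ i) :
    pvBouncy i = (pvRise (pvDigs i.toNat) && pvFall (pvDigs i.toNat)) := by
  have hc : PySem.Int.mod i 10 = ((i.toNat % 10 : Nat) : Int) := by
    rw [PySem.Int.mod_eq_emod_of_pos (by omega)]; omega
  have hf : PySem.Int.floordiv i 10 = ((i.toNat / 10 : Nat) : Int) := by
    rw [PySem.Int.floordiv_eq_ediv_of_pos (by omega)]; omega
  rw [pvBouncy, hc, hf,
    pvBouncyGo_spec (i.toNat / 10) ((i.toNat / 10 : Nat) : Int) ((i.toNat % 10 : Nat) : Int)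
      false false (by omega) (by positivity) (by simp)]
  simp only [Int.toNat_natCast, Bool.false_or]
  rw [show pvDigs i.toNat = pvDigs (i.toNat / 10) ++ [((i.toNat % 10 : Nat) : Int)] from by
    rw [pvDigs, if_neg (by omega)]]

theorem not_bouncy_small (i : Int) (h10 : 10 ≤ i) (h99 : i < 100) :
    (pvRise (pvDigs i.toNat) && pvFall (pvDigs i.toNat)) = false := by
  have e1 : pvDigs i.toNat = [((i.toNat / 10 : Nat) : Int), ((i.toNat % 10 : Nat) : Int)] := by
    rw [pvDigs, if_neg (by omega), pvDigs, if_neg (by omega),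
      show i.toNat / 10 / 10 = 0 from by omega, pvDigs,
      show i.toNat / 10 % 10 = i.toNat / 10 from by omega]
    simp
  rw [e1]
  simp only [pvRise, pvFall, Bool.or_false]
  simp
  omega

-- ===== VERDICT (by name: the statement is the Claim_ definition above) =====
theorem check_count_spec : Claim_equal_check_count := by
  unfold Claim_equal_check_count
  intro N _
  unfold Spec_check_count check_count check_count_alt
  rw [PySem.List.foldl_congr_mem (PySem.List.pyRange 10 (N+1) 1) _
    (fun (res i : Int) => if pvBouncy i then res + 1 else res) 0
    (by
      intro acc x hx
      rw [PySem.List.mem_pyRange_one] at hx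
      have hx1 : (1 : Int) ≤ x := by omega
      simp only [pvZouka_char x hx1, pvGensyo_char x hx1, pvBouncy_eq x hx1]
      cases pvRise (pvDigs x.toNat) <;> cases pvFall (pvDigs x.toNat) <;> simp)]
  rw [PySem.List.foldl_count_if (fun i => pvBouncy i) (PySem.List.pyRange 10 (N+1) 1) 0]
  by_cases h1 : (100 : Int) ≤ N + 1
  · rw [PySem.List.pyRange_one_append 10 100 (N+1) (by omega) h1, List.countP_append]
    have hz : (PySem.List.pyRange 10 100 1).countP (fun i => pvBouncy i) = 0 := by
      rw [List.countP_eq_zero]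
      intro a ha
      rw [PySem.List.mem_pyRange_one] at ha
      simp [pvBouncy_eq a (by omega : (1:Int) ≤ a), not_bouncy_small a (by omega) (by omega)]
    rw [hz]
    push_cast
    ring
  · by_cases h2 : (10 : Int) ≤ N + 1
    · rw [PySem.List.pyRange_one_eq_nil (by omega : N + 1 ≤ 100)]
      have hz : (PySem.List.pyRange 10 (N+1) 1).countP (fun i => pvBouncy i) = 0 := by
        rw [List.countP_eq_zero]
        intro a ha
        rw [PySem.List.mem_pyRange_one] at ha
        simp [pvBouncy_eq a (by omega : (1:Int) ≤ a), not_bouncy_small a (by omega) (by omega)]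
      rw [hz]
      simp
    · rw [PySem.List.pyRange_one_eq_nil (by omega : N + 1 ≤ 10),
        PySem.List.pyRange_one_eq_nil (by omega : N + 1 ≤ 100)]
      simp
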